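-- pv_equiv track=rewrite | github.com/nimish1402/Autonomous_QA_Generator | models/llm_agent.py | _find_button_selector
-- ===== SOURCE A (Python) =====
-- from typing import Dict, List, Any, Optional
--
-- def _find_button_selector(step: str, selectors: Dict) -> Optional[str]:
--     """Find appropriate button selector for a step."""
--     step_lower = step.lower()
--
--     # Check for specific button types
--     if 'apply' in step_lower:
--         for sel_id, sel_info in selectors.items():
--             if 'apply' in sel_id.lower():
--                 return f"(By.ID, '{sel_id}')"
--
--     if 'submit' in step_lower or 'place order' in step_lower:
--         for sel_id, sel_info in selectors.items():
--             if 'submit' in sel_id.lower() or 'order' in sel_id.lower():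
--                 return f"(By.ID, '{sel_id}')"
--
--     # Return first button as fallback
--     for sel_id, sel_info in selectors.items():
--         if sel_info.get('type') == 'button':
--             return f"(By.ID, '{sel_id}')"
--
--     return None
-- ===== SOURCE B (Python) =====
-- def _find_button_selector(step, selectors):
--     """Find appropriate button selector for a step (single pass over selectors)."""
--     step_lower = step.lower()
--     want_apply = 'apply' in step_lower
--     want_submit = 'submit' in step_lower or 'place order' in step_lower
--     apply_id = submit_id = button_id = None
--     for sel_id, sel_info in selectors.items():
--         sid = sel_id.lower()
--         if want_apply and apply_id is None and 'apply' in sid: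
--             apply_id = sel_id
--         if want_submit and submit_id is None and ('submit' in sid or 'order' in sid):
--             submit_id = sel_id
--         if button_id is None and sel_info.get('type') == 'button':
--             button_id = sel_id
--     chosen = apply_id if apply_id is not None else (submit_id if submit_id is not None else button_id)
--     return f"(By.ID, '{chosen}')" if chosen is not None else None
-- ===== Notes on version B (the rewrite author's own statement) =====
-- stated objective: alternative
-- what changed: Replaces A's three sequential scans over selectors (apply scan, submit/order scan, button-type fallback scan) with one single pass that records the first apply/submit/button candidates and picks among them afterwards.
import Mathlib
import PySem

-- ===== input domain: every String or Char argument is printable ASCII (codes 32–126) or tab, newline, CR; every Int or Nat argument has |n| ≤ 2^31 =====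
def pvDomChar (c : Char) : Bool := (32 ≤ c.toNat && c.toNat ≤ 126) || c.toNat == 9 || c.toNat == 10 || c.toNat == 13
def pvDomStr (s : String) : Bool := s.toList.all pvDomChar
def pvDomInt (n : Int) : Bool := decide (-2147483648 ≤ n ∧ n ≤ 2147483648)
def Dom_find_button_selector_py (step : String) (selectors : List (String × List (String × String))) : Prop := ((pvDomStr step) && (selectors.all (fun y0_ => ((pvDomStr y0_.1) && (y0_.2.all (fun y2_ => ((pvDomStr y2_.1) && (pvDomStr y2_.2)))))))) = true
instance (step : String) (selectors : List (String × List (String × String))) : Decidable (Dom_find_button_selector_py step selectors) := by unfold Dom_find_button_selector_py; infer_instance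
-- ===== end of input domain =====

-- One honest line: B does one pass over selectors recording the first apply/submit/button
-- candidates instead of A's up-to-three sequential scans; same results, same cost class (objective: alternative).

-- ===== PORT A =====
-- for-loop 1: 'apply' scan with early return
def pvA_applyLoop : List (String × List (String × String)) → Option String
  | [] => none
  | (sel_id, _) :: rest =>
    if PySem.Str.isIn "apply" (PySem.Str.lower sel_id) then
      some ("(By.ID, '" ++ sel_id ++ "')")
    else pvA_applyLoop rest

-- for-loop 2: 'submit'/'order' scan with early return
def pvA_submitLoop : List (String × List (String × String)) → Option String
  | [] => none
  | (sel_id, _) :: rest =>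
    if PySem.Str.isIn "submit" (PySem.Str.lower sel_id) || PySem.Str.isIn "order" (PySem.Str.lower sel_id) then
      some ("(By.ID, '" ++ sel_id ++ "')")
    else pvA_submitLoop rest

-- for-loop 3: fallback scan on sel_info.get('type') == 'button'
def pvA_buttonLoop : List (String × List (String × String)) → Option String
  | [] => none
  | (sel_id, sel_info) :: rest =>
    if (PySem.Dict.ofList sel_info).get? "type" == some "button" then
      some ("(By.ID, '" ++ sel_id ++ "')")
    else pvA_buttonLoop rest

def find_button_selector_py (step : String) (selectors : List (String × List (String × String))) : Option String :=
  let step_lower := PySem.Str.lower step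
  let items := (PySem.Dict.ofList selectors).items
  match (if PySem.Str.isIn "apply" step_lower then pvA_applyLoop items else none) with
  | some r => some r
  | none =>
    match (if PySem.Str.isIn "submit" step_lower || PySem.Str.isIn "place order" step_lower then
             pvA_submitLoop items else none) with
    | some r => some r
    | none => pvA_buttonLoop items

-- ===== PORT B =====
-- loop body of Source B's single pass: state (apply_id, submit_id, button_id)
def pvB_step (wantApply wantSubmit : Bool)
    (st : Option String × Option String × Option String)
    (kv : String × List (String × String)) : Option String × Option String × Option String :=
  let sid := PySem.Str.lower kv.1
  let a := if wantApply && st.1.isNone && PySem.Str.isIn "apply" sid then some kv.1 else st.1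
  let s := if wantSubmit && st.2.1.isNone && (PySem.Str.isIn "submit" sid || PySem.Str.isIn "order" sid) then
             some kv.1 else st.2.1
  let b := if st.2.2.isNone && ((PySem.Dict.ofList kv.2).get? "type" == some "button") then
             some kv.1 else st.2.2
  (a, s, b)

def find_button_selector_py_alt (step : String) (selectors : List (String × List (String × String))) : Option String :=
  let step_lower := PySem.Str.lower step
  let wantApply := PySem.Str.isIn "apply" step_lower
  let wantSubmit := PySem.Str.isIn "submit" step_lower || PySem.Str.isIn "place order" step_lower
  let st := (PySem.Dict.ofList selectors).items.foldl (pvB_step wantApply wantSubmit) (none, none, none)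
  let chosen := match st.1 with
    | some a => some a
    | none => match st.2.1 with
      | some s => some s
      | none => st.2.2
  match chosen with
  | some c => some ("(By.ID, '" ++ c ++ "')")
  | none => none

-- ===== PRECONDITION & SPEC =====
def Spec_find_button_selector_py (step : String) (selectors : List (String × List (String × String))) (out : Option String) : Prop := out = find_button_selector_py_alt step selectors
instance (step : String) (selectors : List (String × List (String × String))) (out : Option String) : Decidable (Spec_find_button_selector_py step selectors out) := by unfold Spec_find_button_selector_py; infer_instance

-- ===== CLAIM (what is proved, stated in full; the proofs are below) =====
def Claim_equal_find_button_selector_py : Prop := ∀ (step : String) (selectors : List (String × List (String × String))), Dom_find_button_selector_py step selectors → Spec_find_button_selector_py step selectors (find_button_selector_py step selectors)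

-- ===== LEMMAS AND PROOFS =====

def pvOr (a b : Option String) : Option String := match a with | some x => some x | none => b

-- first key matching each predicate, proof-side characterisation
def pvFa (xs : List (String × List (String × String))) : Option String :=
  (xs.find? (fun kv => PySem.Str.isIn "apply" (PySem.Str.lower kv.1))).map (·.1)
def pvFs (xs : List (String × List (String × String))) : Option String :=
  (xs.find? (fun kv => PySem.Str.isIn "submit" (PySem.Str.lower kv.1) || PySem.Str.isIn "order" (PySem.Str.lower kv.1))).map (·.1)
def pvFb (xs : List (String × List (String × String))) : Option String :=
  (xs.find? (fun kv => (PySem.Dict.ofList kv.2).get? "type" == some "button")).map (·.1)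

theorem pvA_applyLoop_eq (xs : List (String × List (String × String))) :
    pvA_applyLoop xs = (pvFa xs).map (fun c => "(By.ID, '" ++ c ++ "')") := by
  induction xs with
  | nil => rfl
  | cons kv rest ih =>
    obtain ⟨sid, info⟩ := kv
    cases hc : PySem.Str.isIn "apply" (PySem.Str.lower sid) <;>
      simp_all [pvA_applyLoop, pvFa]

theorem pvA_submitLoop_eq (xs : List (String × List (String × String))) :
    pvA_submitLoop xs = (pvFs xs).map (fun c => "(By.ID, '" ++ c ++ "')") := by
  induction xs with
  | nil => rfl
  | cons kv rest ih =>
    obtain ⟨sid, info⟩ := kv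
    cases hc : (PySem.Str.isIn "submit" (PySem.Str.lower sid) || PySem.Str.isIn "order" (PySem.Str.lower sid)) <;>
      simp_all [pvA_submitLoop, pvFs]

theorem pvA_buttonLoop_eq (xs : List (String × List (String × String))) :
    pvA_buttonLoop xs = (pvFb xs).map (fun c => "(By.ID, '" ++ c ++ "')") := by
  induction xs with
  | nil => rfl
  | cons kv rest ih =>
    obtain ⟨sid, info⟩ := kv
    cases hc : ((PySem.Dict.ofList info).get? "type" == some "button") <;>
      simp_all [pvA_buttonLoop, pvFb]

theorem pvFa_cons (sid : String) (info : List (String × String)) (rest : List (String × List (String × String))) :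
    pvFa ((sid, info) :: rest) = if PySem.Str.isIn "apply" (PySem.Str.lower sid) then some sid else pvFa rest := by
  cases h : PySem.Str.isIn "apply" (PySem.Str.lower sid) <;> simp_all [pvFa]

theorem pvFs_cons (sid : String) (info : List (String × String)) (rest : List (String × List (String × String))) :
    pvFs ((sid, info) :: rest) = if (PySem.Str.isIn "submit" (PySem.Str.lower sid) || PySem.Str.isIn "order" (PySem.Str.lower sid)) then some sid else pvFs rest := by
  cases h : (PySem.Str.isIn "submit" (PySem.Str.lower sid) || PySem.Str.isIn "order" (PySem.Str.lower sid)) <;> simp_all [pvFs]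

theorem pvFb_cons (sid : String) (info : List (String × String)) (rest : List (String × List (String × String))) :
    pvFb ((sid, info) :: rest) = if ((PySem.Dict.ofList info).get? "type" == some "button") then some sid else pvFb rest := by
  cases h : ((PySem.Dict.ofList info).get? "type" == some "button") <;> simp_all [pvFb]

set_option maxHeartbeats 1000000 in
theorem pvB_fold_eq (wa ws : Bool) (xs : List (String × List (String × String)))
    (oa os ob : Option String) :
    xs.foldl (pvB_step wa ws) (oa, os, ob) =
      (pvOr oa (if wa then pvFa xs else none),
       pvOr os (if ws then pvFs xs else none),
       pvOr ob (pvFb xs)) := by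
  induction xs generalizing oa os ob with
  | nil => cases oa <;> cases os <;> cases ob <;> cases wa <;> cases ws <;> simp [pvOr, pvFa, pvFs, pvFb]
  | cons kv rest ih =>
    obtain ⟨sid, info⟩ := kv
    simp only [List.foldl_cons, ih, pvB_step, pvFa_cons, pvFs_cons, pvFb_cons]
    cases h1 : PySem.Str.isIn "apply" (PySem.Str.lower sid) <;>
      cases h2 : (PySem.Str.isIn "submit" (PySem.Str.lower sid) || PySem.Str.isIn "order" (PySem.Str.lower sid)) <;>
      cases h3 : ((PySem.Dict.ofList info).get? "type" == some "button") <;>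
      cases wa <;> cases ws <;> cases oa <;> cases os <;> cases ob <;>
      simp [pvOr]

-- ===== VERDICT (by name: the statement is the Claim_ definition above) =====
theorem find_button_selector_py_spec : Claim_equal_find_button_selector_py := by
  intro step selectors _
  unfold Spec_find_button_selector_py find_button_selector_py find_button_selector_py_alt
  simp only [pvB_fold_eq, pvA_applyLoop_eq, pvA_submitLoop_eq, pvA_buttonLoop_eq]
  cases hwa : PySem.Str.isIn "apply" (PySem.Str.lower step) <;>
    cases hws : (PySem.Str.isIn "submit" (PySem.Str.lower step) || PySem.Str.isIn "place order" (PySem.Str.lower step)) <;>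
    cases hfa : pvFa (PySem.Dict.ofList selectors).items <;>
    cases hfs : pvFs (PySem.Dict.ofList selectors).items <;>
    cases hfb : pvFb (PySem.Dict.ofList selectors).items <;>
    simp_all [pvOr]
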